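-- pv_equiv track=rewrite | github.com/federicoFrancesconi/UCSE-2024-LFYA-TP-G3 | gramatica.py | generar_producciones
-- ===== SOURCE A (Python) =====
-- from collections import defaultdict
--
-- def generar_producciones(gramatica):
--     reglas = gramatica.strip().split('\n')
--     producciones = defaultdict(list)
--
--     for regla in reglas:
--         regla = regla.strip()
--         antecedente, consecuente = regla.split(':')
--         antecedente = antecedente.strip()
--         consecuente = tuple(consecuente.strip().split())
--
--         # Aprovechamos defaultdict y trabajamos un diccionario como una lista
--         producciones[antecedente].append(consecuente)
--
--     producciones_limpias = limpiar_producciones(producciones)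
--     return producciones_limpias
--
-- def limpiar_producciones(producciones):
--     # Regla 1: Eliminar producciones innecesarias
--     for antecedente in list(producciones.keys()):
--         for consecuente in list(producciones[antecedente]):
--             if len(consecuente) == 1 and antecedente == consecuente[0]:
--                 producciones[antecedente].remove(consecuente)
--
--
--     return producciones
-- ===== SOURCE B (Python) =====
-- from collections import defaultdict
--
-- def generar_producciones(gramatica):
--     # Single pass: create the key on first sight, append only non-self-loop
--     # consequents; no separate cleanup pass over the finished dictionary.
--     producciones = defaultdict(list)
--     for regla in gramatica.strip().split('\n'):
--         regla = regla.strip()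
--         antecedente, consecuente = regla.split(':')
--         antecedente = antecedente.strip()
--         consecuente = tuple(consecuente.strip().split())
--         cuerpo = producciones[antecedente]  # materialise the key even if it stays empty
--         if len(consecuente) != 1 or antecedente != consecuente[0]:
--             cuerpo.append(consecuente)
--     return producciones
-- ===== Notes on version B (the rewrite author's own statement) =====
-- stated objective: simpler
-- what changed: Fused the build pass and the limpiar_producciones cleanup pass into one pass that never appends a self-loop production in the first place (the key is still materialised), removing the second traversal with its quadratic list.remove calls.
import Mathlib
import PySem

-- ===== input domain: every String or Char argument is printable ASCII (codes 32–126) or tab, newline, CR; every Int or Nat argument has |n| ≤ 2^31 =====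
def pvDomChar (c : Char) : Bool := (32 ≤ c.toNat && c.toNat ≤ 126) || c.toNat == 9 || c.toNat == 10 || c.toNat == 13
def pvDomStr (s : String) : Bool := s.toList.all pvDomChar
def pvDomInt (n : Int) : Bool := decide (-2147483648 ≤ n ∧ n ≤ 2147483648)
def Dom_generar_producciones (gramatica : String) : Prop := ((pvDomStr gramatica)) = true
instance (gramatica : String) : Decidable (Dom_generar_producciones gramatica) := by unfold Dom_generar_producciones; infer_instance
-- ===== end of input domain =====

-- B fuses A's build pass and its limpiar_producciones cleanup pass into one pass that
-- skips self-loop productions as it builds (keys are still materialised); objective: simpler.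

-- ===== PORT A =====
def limpiar_producciones (producciones : PySem.Dict String (List (List String))) : PySem.Dict String (List (List String)) :=
  producciones.keys.foldl (fun d antecedente =>
    (d.getD antecedente []).foldl (fun d consecuente =>
      if consecuente.length = 1 ∧ antecedente = consecuente.headD "" then
        d.insert antecedente ((PySem.List.remove? (d.getD antecedente []) consecuente).getD (d.getD antecedente []))
      else d) d) producciones

def generar_producciones (gramatica : String) : List (String × List (List String)) :=
  let reglas := (PySem.Str.split? (PySem.Str.strip gramatica) "\n").getD []
  let producciones := reglas.foldl (fun producciones regla =>
    let regla := PySem.Str.strip regla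
    let partes := (PySem.Str.split? regla ":").getD []
    let antecedente := PySem.Str.strip (partes.headD "")
    let consecuente := PySem.Str.split₀ (PySem.Str.strip (partes.getD 1 ""))
    producciones.modify antecedente [] (· ++ [consecuente])) PySem.Dict.empty
  (limpiar_producciones producciones).items

def generar_producciones_alt (gramatica : String) : List (String × List (List String)) :=
  let producciones := ((PySem.Str.split? (PySem.Str.strip gramatica) "\n").getD []).foldl
    (fun producciones regla =>
      let regla := PySem.Str.strip regla
      let partes := (PySem.Str.split? regla ":").getD []
      let antecedente := PySem.Str.strip (partes.headD "")
      let consecuente := PySem.Str.split₀ (PySem.Str.strip (partes.getD 1 ""))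
      let producciones := producciones.setdefault antecedente []
      if consecuente.length ≠ 1 ∨ antecedente ≠ consecuente.headD "" then
        producciones.modify antecedente [] (· ++ [consecuente])
      else producciones) PySem.Dict.empty
  producciones.items


-- ===== PRECONDITION & SPEC =====
-- Pre_ excludes exactly the inputs where Python A raises ValueError: a (stripped) line
-- whose own strip does not split on ':' into exactly two pieces (no ':' or several).
def Pre_generar_producciones (gramatica : String) : Prop :=
  ∀ regla ∈ (PySem.Str.split? (PySem.Str.strip gramatica) "\n").getD [],
    ((PySem.Str.split? (PySem.Str.strip regla) ":").getD []).length = 2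

instance (gramatica : String) : Decidable (Pre_generar_producciones gramatica) := by
  unfold Pre_generar_producciones; infer_instance

def pvWitness_generar_producciones : String := "S : a b\nS : S\nX:X"

def Spec_generar_producciones (gramatica : String) (out : List (String × List (List String))) : Prop :=
  out = generar_producciones_alt gramatica

instance (gramatica : String) (out : List (String × List (List String))) :
    Decidable (Spec_generar_producciones gramatica out) := by
  unfold Spec_generar_producciones; infer_instance

-- ===== CLAIM (what is proved, stated in full; the proofs are below) =====
def Claim_equal_generar_producciones : Prop :=
  ∀ (gramatica : String), Dom_generar_producciones gramatica →
    Pre_generar_producciones gramatica →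
    Spec_generar_producciones gramatica (generar_producciones gramatica)

-- ===== LEMMAS AND PROOFS =====
def slRm (e : List String) (w : List (List String)) : List (List String) :=
  (PySem.List.remove? w e).getD w

lemma slRm_cons_self (e : List String) (t : List (List String)) : slRm e (e :: t) = t := by
  simp [slRm, PySem.List.remove?, List.idxOf?_cons]

lemma slRm_cons_ne (e x : List String) (t : List (List String)) (h : x ≠ e) :
    slRm e (x :: t) = x :: slRm e t := by
  simp only [slRm, PySem.List.remove?, List.idxOf?_cons]
  rcases h' : List.idxOf? e t with _ | k
  · simp [beq_iff_eq, h]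
  · simp [beq_iff_eq, h, List.eraseIdx_cons_succ]

lemma iter_slRm_cons_ne (e x : List String) (h : x ≠ e) :
    ∀ (n : Nat) (t : List (List String)), (slRm e)^[n] (x :: t) = x :: (slRm e)^[n] t := by
  intro n
  induction n with
  | zero => intro t; simp
  | succ n ih => intro t; rw [Function.iterate_succ_apply, Function.iterate_succ_apply,
      slRm_cons_ne e x t h, ih]

lemma iter_slRm_count (e : List String) :
    ∀ w : List (List String), (slRm e)^[w.count e] w = w.filter (fun c => c ≠ e) := by
  intro w
  induction w with
  | nil => simp
  | cons x t ih =>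
    by_cases hx : x = e
    · subst hx
      rw [List.count_cons_self, Function.iterate_succ_apply, slRm_cons_self, ih]
      simp
    · rw [List.count_cons_of_ne (by simpa using hx), iter_slRm_cons_ne e x hx, ih]
      simp [hx]

lemma sl_iff (a : String) (c : List String) :
    (c.length = 1 ∧ a = c.headD "") ↔ c = [a] := by
  constructor
  · rintro ⟨h1, h2⟩
    match c, h1 with
    | [x], _ => simp_all
  · rintro rfl; simp

lemma insert_getD_eq_self (d : PySem.Dict String (List (List String))) (a : String)
    (hc : d.contains a = true) (hnd : d.keys.Nodup) :
    d.insert a (d.getD a []) = d := by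
  apply PySem.Dict.ext
  rw [PySem.Dict.items_insert_of_contains d _ hc]
  conv_rhs => rw [← List.map_id d.items]
  apply List.map_congr_left
  intro p hp
  by_cases h : p.1 = a
  · have : (p.1, p.2) ∈ d.items := hp
    rw [h] at this
    have hg := PySem.Dict.getD_of_mem_items d this hnd []
    simp only [h, beq_self_eq_true, if_pos, id_eq, hg]
    exact (Prod.ext h.symm rfl)
  · simp [h]

-- inner fold of limpiar at key a
lemma inner_fold_eq (a : String) :
    ∀ (v : List (List String)) (d : PySem.Dict String (List (List String))),
      d.contains a = true → d.keys.Nodup →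
      (v.foldl (fun d consecuente =>
        if consecuente.length = 1 ∧ a = consecuente.headD "" then
          d.insert a ((PySem.List.remove? (d.getD a []) consecuente).getD (d.getD a []))
        else d) d)
      = d.insert a ((slRm [a])^[v.count [a]] (d.getD a [])) := by
  intro v
  induction v with
  | nil => intro d hc hnd; simpa using (insert_getD_eq_self d a hc hnd).symm
  | cons c t ih =>
    intro d hc hnd
    by_cases hcc : c = [a]
    · subst hcc
      rw [List.foldl_cons, if_pos ((sl_iff a _).mpr rfl)]
      rw [ih _ (PySem.Dict.contains_insert_self _ _ _) (PySem.Dict.nodup_keys_insert _ _ _ hnd)]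
      rw [PySem.Dict.insert_insert_self, PySem.Dict.getD_insert_self,
        List.count_cons_self, Function.iterate_succ_apply]
      rfl
    · rw [List.foldl_cons, if_neg (by rw [sl_iff]; exact hcc), ih _ hc hnd,
        List.count_cons_of_ne (by simpa using hcc)]

def cl (p : String × List (List String)) : String × List (List String) :=
  (p.1, p.2.filter (fun c => c ≠ [p.1]))

lemma cl_fst (p : String × List (List String)) : (cl p).1 = p.1 := rfl

lemma cl_cl (p : String × List (List String)) : cl (cl p) = cl p := by
  simp only [cl, List.filter_filter]
  exact Prod.ext rfl (List.filter_congr (fun a _ => by simp))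

-- one outer step of limpiar
lemma step_items (d : PySem.Dict String (List (List String))) (a : String)
    (hc : d.contains a = true) (hnd : d.keys.Nodup) :
    ((d.getD a []).foldl (fun d consecuente =>
        if consecuente.length = 1 ∧ a = consecuente.headD "" then
          d.insert a ((PySem.List.remove? (d.getD a []) consecuente).getD (d.getD a []))
        else d) d).items
      = d.items.map (fun p => if p.1 = a then cl p else p) := by
  rw [inner_fold_eq a _ d hc hnd, iter_slRm_count,
    PySem.Dict.items_insert_of_contains d _ hc]
  apply List.map_congr_left
  intro p hp
  by_cases h : p.1 = a
  · have hmem : (a, p.2) ∈ d.items := by rw [← h]; exact hp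
    have hg := PySem.Dict.getD_of_mem_items d hmem hnd []
    simp only [h, beq_self_eq_true, if_pos, cl, hg]
  · simp [h]

lemma keys_of_items_map (d d' : PySem.Dict String (List (List String)))
    (g : String × List (List String) → String × List (List String))
    (hg : ∀ p, (g p).1 = p.1) (h : d'.items = d.items.map g) : d'.keys = d.keys := by
  simp only [PySem.Dict.keys, h, List.map_map]
  exact List.map_congr_left (fun p _ => hg p)

lemma outer_fold_items :
    ∀ (ks : List String) (d : PySem.Dict String (List (List String))),
      (∀ k ∈ ks, d.contains k = true) → d.keys.Nodup →
      (ks.foldl (fun d antecedente =>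
        (d.getD antecedente []).foldl (fun d consecuente =>
          if consecuente.length = 1 ∧ antecedente = consecuente.headD "" then
            d.insert antecedente ((PySem.List.remove? (d.getD antecedente []) consecuente).getD (d.getD antecedente []))
          else d) d) d).items
        = d.items.map (fun p => if p.1 ∈ ks then cl p else p) := by
  intro ks
  induction ks with
  | nil => intro d _ _; simp
  | cons k ks ih =>
    intro d hc hnd
    rw [List.foldl_cons]
    set d' : PySem.Dict String (List (List String)) :=
      (d.getD k []).foldl (fun d consecuente =>
          if consecuente.length = 1 ∧ k = consecuente.headD "" then
            d.insert k ((PySem.List.remove? (d.getD k []) consecuente).getD (d.getD k []))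
          else d) d with hd'
    have hitems : d'.items = d.items.map (fun p => if p.1 = k then cl p else p) :=
      step_items d k (hc k (by simp)) hnd
    have hkeys : d'.keys = d.keys :=
      keys_of_items_map d d' _ (fun p => by by_cases h : p.1 = k <;> simp [h, cl_fst]) hitems
    have hc' : ∀ k' ∈ ks, d'.contains k' = true := by
      intro k' hk'
      rw [PySem.Dict.contains_eq_decide_mem_keys, hkeys,
        ← PySem.Dict.contains_eq_decide_mem_keys]
      exact hc k' (by simp [hk'])
    have hnd' : d'.keys.Nodup := hkeys ▸ hnd
    rw [ih d' hc' hnd', hitems, List.map_map]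
    apply List.map_congr_left
    intro p _
    by_cases h1 : p.1 = k
    · by_cases h2 : p.1 ∈ ks <;>
        simp [Function.comp, h1, cl_fst, cl_cl, List.mem_cons]
    · by_cases h2 : p.1 ∈ ks <;>
        simp [Function.comp, h1, h2, List.mem_cons]

lemma slB_iff (a : String) (c : List String) :
    (c.length ≠ 1 ∨ a ≠ c.headD "") ↔ c ≠ [a] := by
  simp only [ne_eq, ← sl_iff a c]; tauto

def pvAnte (regla : String) : String :=
  PySem.Str.strip (((PySem.Str.split? (PySem.Str.strip regla) ":").getD []).headD "")
def pvCons (regla : String) : List String :=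
  PySem.Str.split₀ (PySem.Str.strip (((PySem.Str.split? (PySem.Str.strip regla) ":").getD []).getD 1 ""))

lemma exists_getD_mem (d : PySem.Dict String (List (List String))) (a : String)
    (hc : d.contains a = true) : (a, d.getD a []) ∈ d.items := by
  rw [PySem.Dict.contains_eq_isSome_get?] at hc
  obtain ⟨v, hv⟩ := Option.isSome_iff_exists.mp hc
  have := PySem.Dict.mem_items_of_get?_eq_some d hv
  rwa [PySem.Dict.getD_of_get?_eq_some d [] hv]

lemma main_invariant :
    ∀ (reglas : List String) (dA dB : PySem.Dict String (List (List String))),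
      dA.keys.Nodup → dB.items = dA.items.map cl →
      (reglas.foldl (fun d regla =>
          let d' := d.setdefault (pvAnte regla) []
          if (pvCons regla).length ≠ 1 ∨ (pvAnte regla) ≠ (pvCons regla).headD "" then
            d'.modify (pvAnte regla) [] (· ++ [(pvCons regla)])
          else d') dB).items
      = ((reglas.foldl (fun d regla =>
          d.modify (pvAnte regla) [] (· ++ [(pvCons regla)])) dA).items).map cl := by
  intro reglas
  induction reglas with
  | nil => intro dA dB _ h; simpa using h
  | cons r rs ih =>
    intro dA dB hnd hinv
    rw [List.foldl_cons, List.foldl_cons]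
    set a := (pvAnte r)
    set c := (pvCons r)
    have hkeys : dB.keys = dA.keys :=
      keys_of_items_map dA dB cl (fun p => cl_fst p) hinv
    have hcAB : ∀ x, dB.contains x = dA.contains x := by
      intro x
      rw [PySem.Dict.contains_eq_decide_mem_keys, PySem.Dict.contains_eq_decide_mem_keys, hkeys]
    have hndB : dB.keys.Nodup := hkeys ▸ hnd
    have hA : (dA.modify a [] (· ++ [c])) = dA.insert a (dA.getD a [] ++ [c]) := rfl
    by_cases hca : dA.contains a = true
    · -- key already present
      have hsdB : dB.setdefault a [] = dB :=
        PySem.Dict.setdefault_of_contains dB [] (by rw [hcAB a]; exact hca)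
      have hvmem : (a, dA.getD a []) ∈ dA.items := exists_getD_mem dA a hca
      have hAitems : (dA.insert a (dA.getD a [] ++ [c])).items
          = dA.items.map (fun p => if (p.1 == a) = true then (a, dA.getD a [] ++ [c]) else p) :=
        PySem.Dict.items_insert_of_contains dA _ hca
      by_cases hsl : c = [a]
      · -- self-loop: B skips the append
        simp only [hsdB]
        rw [if_neg (by simp [hsl])]
        refine ih _ dB (PySem.Dict.nodup_keys_insert dA _ _ hnd) ?_
        rw [hA, hAitems, List.map_map, hinv]
        apply List.map_congr_left
        intro p hp
        by_cases h1 : p.1 = a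
        · have hg := PySem.Dict.getD_of_mem_items dA (show (a, p.2) ∈ dA.items from h1 ▸ hp) hnd []
          simp only [Function.comp, h1, beq_self_eq_true, if_pos, cl, hg, hsl,
            List.filter_append]
          simp
        · simp [Function.comp, h1]
      · -- not a self-loop: both append
        simp only [hsdB]
        rw [if_pos ((slB_iff a c).mpr hsl)]
        have hgB : dB.getD a [] = (dA.getD a []).filter (fun x => x ≠ [a]) := by
          have : cl (a, dA.getD a []) ∈ dB.items := by
            rw [hinv]; exact List.mem_map_of_mem hvmem
          exact PySem.Dict.getD_of_mem_items dB this hndB []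
        have hB : (dB.modify a [] (· ++ [c])) = dB.insert a (dB.getD a [] ++ [c]) := rfl
        refine ih _ _ (PySem.Dict.nodup_keys_insert dA _ _ hnd) ?_
        rw [hA, hB, hAitems,
          PySem.Dict.items_insert_of_contains dB _ (by rw [hcAB a]; exact hca),
          hinv, List.map_map, List.map_map]
        apply List.map_congr_left
        intro p hp
        by_cases h1 : p.1 = a
        · have hg := PySem.Dict.getD_of_mem_items dA (show (a, p.2) ∈ dA.items from h1 ▸ hp) hnd []
          simp only [Function.comp, h1, beq_self_eq_true, if_pos, cl, hg, hgB,
            List.filter_append]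
          simp [hsl]
        · simp [Function.comp, h1, cl_fst]
    · -- fresh key
      have hca' : dA.contains a = false := by simpa using hca
      have hcB' : dB.contains a = false := by rw [hcAB a]; exact hca'
      have hsdB : dB.setdefault a [] = dB.insert a [] :=
        PySem.Dict.setdefault_of_not_contains dB [] hcB'
      have hget : dA.getD a [] = [] := PySem.Dict.getD_of_not_contains dA [] hca'
      have hA2 : (dA.modify a [] (· ++ [c])) = dA.insert a ([] ++ [c]) := by rw [hA, hget]
      have hAitems : (dA.insert a ([] ++ [c])).items = dA.items ++ [(a, [] ++ [c])] :=
        PySem.Dict.items_insert_of_not_contains dA _ hca'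
      by_cases hsl : c = [a]
      · simp only [hsdB]
        rw [if_neg (by simp [hsl])]
        refine ih _ _ (PySem.Dict.nodup_keys_insert dA _ _ hnd) ?_
        rw [hA2, hAitems, PySem.Dict.items_insert_of_not_contains dB _ hcB',
          List.map_append, hinv]
        simp [cl, hsl]
      · simp only [hsdB]
        rw [if_pos ((slB_iff a c).mpr hsl)]
        have hB : (dB.insert a []).modify a [] (· ++ [c]) = dB.insert a ([] ++ [c]) := by
          show (dB.insert a []).insert a _ = _
          rw [PySem.Dict.getD_insert_self, PySem.Dict.insert_insert_self]
        refine ih _ _ (PySem.Dict.nodup_keys_insert dA _ _ hnd) ?_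
        rw [hA2, hB, hAitems, PySem.Dict.items_insert_of_not_contains dB _ hcB',
          List.map_append, hinv]
        simp [cl, hsl]

lemma limpiar_items (d : PySem.Dict String (List (List String))) (hnd : d.keys.Nodup) :
    (limpiar_producciones d).items = d.items.map cl := by
  unfold limpiar_producciones
  rw [outer_fold_items d.keys d
    (fun k hk => (PySem.Dict.contains_iff_mem_keys d k).mpr hk) hnd]
  apply List.map_congr_left
  intro p hp
  exact if_pos (List.mem_map_of_mem hp)

-- ===== VERDICT (by name: the statement is the Claim_ definition above) =====
theorem generar_producciones_spec : Claim_equal_generar_producciones := by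
  intro gramatica _ _
  show generar_producciones gramatica = generar_producciones_alt gramatica
  have hA : generar_producciones gramatica
      = (limpiar_producciones (((PySem.Str.split? (PySem.Str.strip gramatica) "\n").getD []).foldl
          (fun d regla => d.modify (pvAnte regla) [] (· ++ [(pvCons regla)]))
          PySem.Dict.empty)).items := rfl
  have hB : generar_producciones_alt gramatica
      = (((PySem.Str.split? (PySem.Str.strip gramatica) "\n").getD []).foldl
          (fun d regla =>
            let d' := d.setdefault (pvAnte regla) []
            if (pvCons regla).length ≠ 1 ∨ (pvAnte regla) ≠ (pvCons regla).headD "" then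
              d'.modify (pvAnte regla) [] (· ++ [(pvCons regla)])
            else d') PySem.Dict.empty).items := rfl
  have hnd : ((((PySem.Str.split? (PySem.Str.strip gramatica) "\n").getD []).foldl
      (fun d regla => d.modify (pvAnte regla) [] (· ++ [(pvCons regla)]))
      PySem.Dict.empty)).keys.Nodup :=
    PySem.Dict.nodup_keys_foldl_modify_key _ (fun regla => (pvAnte regla)) []
      (fun _ regla => (· ++ [(pvCons regla)])) PySem.Dict.empty
      PySem.Dict.nodup_keys_empty
  rw [hA, hB, limpiar_items _ hnd,
    main_invariant ((PySem.Str.split? (PySem.Str.strip gramatica) "\n").getD [])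
      PySem.Dict.empty PySem.Dict.empty PySem.Dict.nodup_keys_empty (by rfl)]
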